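-- pv_equiv track=rewrite | github.com/jb803/tensorForm | tensorForm/tensor.py | getNextAvailableIndex
-- ===== SOURCE A (Python) =====
-- _alphabet = list('abcdefghijklmnopqrstuvwxyz')
--
-- class IndexError(Exception):
--     """This error is used if the error arises due to mismatching or invalid indices"""
--     def __init__(self,message):
--         self.message = message
--
-- def getNextAvailableIndex(indices):
--     """Gets the next available index that's not been used so far.
--     Args:
--         indices: the indices used so far
--     """
--
--     for a in _alphabet:
--         found = False
--         for b in indices:
--             if b.lower() == a:
--                 found = True
--         if not found:
--             return a
--     #If we get here there are no available indices
--     raise IndexError('No more available indices')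
-- ===== SOURCE B (Python) =====
-- _alphabet = list('abcdefghijklmnopqrstuvwxyz')
--
-- class IndexError(Exception):
--     """This error is used if the error arises due to mismatching or invalid indices"""
--     def __init__(self, message):
--         self.message = message
--
-- def getNextAvailableIndex(indices):
--     """Gets the next available index that's not been used so far (set difference + min)."""
--     used = {i.lower() for i in indices}
--     remaining = set(_alphabet) - used
--     if not remaining:
--         raise IndexError('No more available indices')
--     return min(remaining)
-- ===== Notes on version B (the rewrite author's own statement) =====
-- stated objective: simpler
-- what changed: Replaced the alphabet-by-indices nested flag loop with a set of lowered indices built once, a set difference against the alphabet, and min of the remainder.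
import Mathlib
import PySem

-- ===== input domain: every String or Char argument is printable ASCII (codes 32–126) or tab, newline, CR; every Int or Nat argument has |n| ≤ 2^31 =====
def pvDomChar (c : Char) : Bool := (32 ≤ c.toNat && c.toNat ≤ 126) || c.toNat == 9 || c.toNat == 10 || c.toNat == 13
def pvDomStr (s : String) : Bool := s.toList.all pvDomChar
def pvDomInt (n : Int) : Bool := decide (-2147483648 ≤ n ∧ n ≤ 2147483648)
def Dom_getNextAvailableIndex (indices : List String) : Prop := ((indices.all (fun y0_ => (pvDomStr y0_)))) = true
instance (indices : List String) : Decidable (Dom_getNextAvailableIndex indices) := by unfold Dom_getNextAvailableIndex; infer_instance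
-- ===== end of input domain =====

-- B replaces A's alphabet×indices nested loop by a set of lowered indices built once,
-- a set difference against the alphabet, and min of the remainder (objective: simpler).

-- ===== PORT A =====
def pvAlphabet : List String :=
  ["a","b","c","d","e","f","g","h","i","j","k","l","m","n","o","p","q","r","s","t","u","v","w","x","y","z"]

-- the 'for a in _alphabet' loop with its inner flag-setting 'for b in indices' loop
def pvALoop (letters : List String) (indices : List String) : Option String :=
  match letters with
  | [] => none
  | a :: rest =>
    let found := indices.foldl (fun f b => if PySem.Str.lower b == a then true else f) false
    if found then pvALoop rest indices else some a

def getNextAvailableIndex (indices : List String) : String :=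
  (pvALoop pvAlphabet indices).getD ""   -- none = the 'raise IndexError' path, excluded by Pre_

-- ===== PORT B =====
def getNextAvailableIndex_alt (indices : List String) : String :=
  let used : PySem.Set String := PySem.Set.ofList (indices.map PySem.Str.lower)
  let remaining : PySem.Set String := PySem.Set.diff (PySem.Set.ofList pvAlphabet) used
  (PySem.List.min? remaining (fun x => x)).getD ""   -- none = empty remaining = the 'raise IndexError' path

-- ===== PRECONDITION & SPEC =====
-- Pre_ excludes exactly the inputs where every alphabet letter is used: there both Pythons raise IndexError.
def Pre_getNextAvailableIndex (indices : List String) : Prop :=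
  ∃ a ∈ pvAlphabet, ∀ b ∈ indices, PySem.Str.lower b ≠ a
instance (indices : List String) : Decidable (Pre_getNextAvailableIndex indices) := by
  unfold Pre_getNextAvailableIndex; infer_instance

def pvWitness_getNextAvailableIndex : List String := ["a", "B", "zz"]

def Spec_getNextAvailableIndex (indices : List String) (out : String) : Prop := out = getNextAvailableIndex_alt indices
instance (indices : List String) (out : String) : Decidable (Spec_getNextAvailableIndex indices out) := by unfold Spec_getNextAvailableIndex; infer_instance

-- ===== CLAIM (what is proved, stated in full; the proofs are below) =====
def Claim_equal_getNextAvailableIndex : Prop := ∀ (indices : List String), Dom_getNextAvailableIndex indices → Pre_getNextAvailableIndex indices → Spec_getNextAvailableIndex indices (getNextAvailableIndex indices)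

-- ===== LEMMAS AND PROOFS =====

-- A's inner flag loop is List.any
theorem pvFound_eq_any (indices : List String) (a : String) :
    indices.foldl (fun f b => if PySem.Str.lower b == a then true else f) false
      = indices.any (fun b => PySem.Str.lower b == a) := by
  suffices h : ∀ (init : Bool), indices.foldl (fun f b => if PySem.Str.lower b == a then true else f) init
      = (init || indices.any (fun b => PySem.Str.lower b == a)) by
    simpa using h false
  induction indices with
  | nil => intro init; simp
  | cons b t ih =>
    intro init
    simp only [List.foldl_cons, List.any_cons, ih]
    by_cases h : PySem.Str.lower b == a <;> simp [h]

-- A's outer loop is find? of the "unused" predicate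
theorem pvALoop_eq_find? (letters indices : List String) :
    pvALoop letters indices = letters.find? (fun a => !indices.any (fun b => PySem.Str.lower b == a)) := by
  induction letters with
  | nil => rfl
  | cons a rest ih =>
    simp only [pvALoop, List.find?_cons, pvFound_eq_any]
    by_cases h : indices.any (fun b => PySem.Str.lower b == a) <;> simp [h, ih]

-- min? of a strictly increasing list is its head
theorem pvMin?_of_pairwise_lt (l : List String) (h : l.Pairwise (· < ·)) :
    PySem.List.min? l (fun x => x) = l.head? := by
  cases l with
  | nil => rfl
  | cons x t =>
    rw [PySem.List.min?_id_cons]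
    simp only [List.head?_cons, Option.some.injEq]
    have hx : ∀ y ∈ t, x ≤ y := fun y hy => le_of_lt ((List.pairwise_cons.mp h).1 y hy)
    clear h
    induction t with
    | nil => rfl
    | cons y t ih =>
      have hxy : x ≤ y := hx y (by simp)
      simp only [List.foldl_cons, min_eq_left hxy]
      exact ih (fun z hz => hx z (by simp [hz]))

theorem getNextAvailableIndex_spec : Claim_equal_getNextAvailableIndex := by
  intro indices _ _
  unfold Spec_getNextAvailableIndex getNextAvailableIndex getNextAvailableIndex_alt
  show (pvALoop pvAlphabet indices).getD ""
      = (PySem.List.min? (PySem.Set.diff (PySem.Set.ofList pvAlphabet)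
          (PySem.Set.ofList (indices.map PySem.Str.lower))) (fun x => x)).getD ""
  rw [pvALoop_eq_find?]
  have hofl : PySem.Set.ofList pvAlphabet = pvAlphabet := by decide
  rw [hofl]
  have hdiff : PySem.Set.diff pvAlphabet (PySem.Set.ofList (indices.map PySem.Str.lower))
      = pvAlphabet.filter (fun a => !(PySem.Set.ofList (indices.map PySem.Str.lower)).contains a) := by
    rfl
  rw [hdiff]
  have hsorted : (pvAlphabet.filter
      (fun a => !(PySem.Set.ofList (indices.map PySem.Str.lower)).contains a)).Pairwise (· < ·) := by
    apply List.Pairwise.filter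
    have h0 : pvAlphabet.Pairwise (fun a b => a.toList < b.toList) := by decide
    exact h0.imp (fun h => String.lt_iff_toList_lt.mpr h)
  rw [pvMin?_of_pairwise_lt _ hsorted, List.head?_filter]
  have hp : (fun a : String => !indices.any (fun b => PySem.Str.lower b == a))
      = (fun a : String => !(PySem.Set.ofList (indices.map PySem.Str.lower)).contains a) := by
    funext a
    have h1 : (indices.any (fun b => PySem.Str.lower b == a))
        = ((PySem.Set.ofList (indices.map PySem.Str.lower)).contains a) := by
      rw [Bool.eq_iff_iff]
      simp only [List.any_eq_true, PySem.Set.contains_iff, PySem.Set.mem_ofList,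
        List.mem_map, beq_iff_eq]
    rw [h1]
  rw [hp]
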